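-- pv_equiv track=rewrite | github.com/opengraviton/graviton | graviton/sparsity/moe.py | extract_moe_experts
-- ===== SOURCE A (Python) =====
-- from typing import Tuple, List, Optional
--
-- def extract_moe_experts(
--     model_state_dict: dict, layer_idx: int, num_experts: int = 8
-- ) -> List[dict]:
--     """
--     Utility: Extract individual experts from a unified MoE state dict.
--
--     Useful for lazy-loading experts individually from disk.
--
--     Args:
--         model_state_dict: Huge state dict containing all experts.
--         layer_idx: Transformer layer index.
--         num_experts: Total number of experts.
--
--     Returns:
--         List of state dictionaries, one per expert.
--     """
--     experts = [{} for _ in range(num_experts)]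
--     prefix = f"model.layers.{layer_idx}.block_sparse_moe.experts."
--
--     for i in range(num_experts):
--         expert_prefix = f"{prefix}{i}."
--
--         # Find keys that belong to this expert
--         for key, tensor in model_state_dict.items():
--             if key.startswith(expert_prefix):
--                 # Strip prefix for the individual expert dict
--                 short_key = key[len(expert_prefix) :]
--                 experts[i][short_key] = tensor
--
--     return experts
-- ===== SOURCE B (Python) =====
-- def extract_moe_experts(model_state_dict, layer_idx, num_experts=8):
--     """Single pass: group keys by the segment after the common prefix, then pick str(i) per expert."""
--     prefix = f"model.layers.{layer_idx}.block_sparse_moe.experts."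
--     plen = len(prefix)
--     groups = {}
--     for key, tensor in model_state_dict.items():
--         if key.startswith(prefix):
--             rest = key[plen:]
--             p = rest.find(".")
--             if p != -1:
--                 groups.setdefault(rest[:p], {})[rest[p + 1:]] = tensor
--     return [groups.get(str(i), {}) for i in range(num_experts)]
-- ===== Notes on version B (the rewrite author's own statement) =====
-- stated objective: faster
-- what changed: Instead of rescanning the whole state dict once per expert, B makes a single pass over the dict, grouping each matching key by the segment between the common prefix and the next dot, and then picks group str(i) for each expert index.
import Mathlib
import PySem

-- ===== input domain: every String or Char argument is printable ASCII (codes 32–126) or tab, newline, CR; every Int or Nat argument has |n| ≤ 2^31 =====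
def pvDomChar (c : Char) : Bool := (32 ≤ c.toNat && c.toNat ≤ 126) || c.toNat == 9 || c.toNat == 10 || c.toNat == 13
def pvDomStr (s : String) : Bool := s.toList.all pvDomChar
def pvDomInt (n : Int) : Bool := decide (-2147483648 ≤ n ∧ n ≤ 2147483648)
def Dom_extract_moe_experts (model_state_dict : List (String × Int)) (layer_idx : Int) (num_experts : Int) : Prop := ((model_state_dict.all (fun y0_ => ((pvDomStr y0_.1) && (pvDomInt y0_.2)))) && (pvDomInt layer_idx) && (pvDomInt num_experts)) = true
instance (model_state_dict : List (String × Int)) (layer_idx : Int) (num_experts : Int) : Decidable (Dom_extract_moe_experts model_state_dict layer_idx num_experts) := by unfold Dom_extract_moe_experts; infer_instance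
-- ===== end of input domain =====

-- B replaces A's per-expert rescans of the whole state dict by ONE pass that groups each matching
-- key under the segment between the common prefix and the next '.', then picks group str(i) per
-- expert (objective: faster).
-- Strings are handled as their char lists (PySem.Chars, exact) and converted back at the end.

-- ===== PORT A =====
-- A: experts = [{} for _ in range(num_experts)]; for each i, scan ALL items and collect keys
-- starting with prefix+str(i)+"." into experts[i] (key stripped of the expert prefix).
def extract_moe_experts (model_state_dict : List (String × Int)) (layer_idx : Int) (num_experts : Int) : List (List (String × Int)) :=
  let experts : List (PySem.Dict (List Char) Int) :=
    (PySem.List.pyRange 0 num_experts 1).map (fun _ => PySem.Dict.empty)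
  let pre : List Char :=
    "model.layers.".toList ++ PySem.Int.toChars layer_idx ++ ".block_sparse_moe.experts.".toList
  let res :=
    (PySem.List.pyRange 0 num_experts 1).foldl (fun experts i =>
      let ep := pre ++ PySem.Int.toChars i ++ ['.']
      model_state_dict.foldl (fun experts kv =>
        if PySem.Chars.startswith kv.1.toList ep then
          -- experts[i][key[len(ep):]] = tensor  (i is a valid index by construction)
          experts.modify i.toNat (fun d =>
            d.insert (PySem.List.slice kv.1.toList (some (ep.length : Int)) none) kv.2)
        else experts) experts) experts
  res.map (fun d => d.items.map (fun p => (String.ofList p.1, p.2)))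

-- ===== PORT B =====
-- the body of B's single loop over the state dict; Python B's local variables
-- rest = key[plen:] and p = rest.find('.') are written out inline here.
-- groups.setdefault(rest[:p], {})[rest[p+1:]] = tensor  is  Dict.modify seg {} (insert short)
def pvBStep (pre : List Char)
    (groups : PySem.Dict (List Char) (PySem.Dict (List Char) Int)) (kv : String × Int) :
    PySem.Dict (List Char) (PySem.Dict (List Char) Int) :=
  if PySem.Chars.startswith kv.1.toList pre then
    if PySem.Chars.find (PySem.List.slice kv.1.toList (some (pre.length : Int)) none) ['.'] ≠ -1 then
      groups.modify
        (PySem.List.slice (PySem.List.slice kv.1.toList (some (pre.length : Int)) none) none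
          (some (PySem.Chars.find (PySem.List.slice kv.1.toList (some (pre.length : Int)) none) ['.'])))
        PySem.Dict.empty
        (fun d => d.insert
          (PySem.List.slice (PySem.List.slice kv.1.toList (some (pre.length : Int)) none)
            (some (PySem.Chars.find (PySem.List.slice kv.1.toList (some (pre.length : Int)) none) ['.'] + 1)) none)
          kv.2)
    else groups
  else groups

def extract_moe_experts_alt (model_state_dict : List (String × Int)) (layer_idx : Int) (num_experts : Int) : List (List (String × Int)) :=
  let pre : List Char :=
    "model.layers.".toList ++ PySem.Int.toChars layer_idx ++ ".block_sparse_moe.experts.".toList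
  let groups := model_state_dict.foldl (pvBStep pre) PySem.Dict.empty
  -- [groups.get(str(i), {}) for i in range(num_experts)]
  ((PySem.List.pyRange 0 num_experts 1).map
      (fun i => groups.getD (PySem.Int.toChars i) PySem.Dict.empty)).map
    (fun d => d.items.map (fun p => (String.ofList p.1, p.2)))

-- ===== PRECONDITION & SPEC =====
def Spec_extract_moe_experts (model_state_dict : List (String × Int)) (layer_idx : Int) (num_experts : Int) (out : List (List (String × Int))) : Prop := out = extract_moe_experts_alt model_state_dict layer_idx num_experts
instance (model_state_dict : List (String × Int)) (layer_idx : Int) (num_experts : Int) (out : List (List (String × Int))) : Decidable (Spec_extract_moe_experts model_state_dict layer_idx num_experts out) := by unfold Spec_extract_moe_experts; infer_instance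

-- ===== CLAIM (what is proved, stated in full; the proofs are below) =====
def Claim_equal_extract_moe_experts : Prop := ∀ (model_state_dict : List (String × Int)) (layer_idx : Int) (num_experts : Int), Dom_extract_moe_experts model_state_dict layer_idx num_experts → Spec_extract_moe_experts model_state_dict layer_idx num_experts (extract_moe_experts model_state_dict layer_idx num_experts)

-- ===== LEMMAS AND PROOFS =====

-- str(i) for i ≥ 0 consists of digits only; in particular it contains no '.'
theorem pv_dot_not_mem_toChars {i : Int} (hi : 0 ≤ i) : '.' ∉ PySem.Int.toChars i := by
  intro h
  unfold PySem.Int.toChars at h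
  rw [if_neg (by omega)] at h
  have := Nat.isDigit_of_mem_toDigits (by norm_num) (by norm_num) h
  simp [Char.isDigit] at this

theorem pv_singleton_prefix_drop {c : Char} {l : List Char} {j : Nat} :
    [c] <+: l.drop j ↔ l[j]? = some c := by
  have h0 : l[j]? = (l.drop j)[0]? := by simp
  rw [h0]
  generalize l.drop j = t
  cases t <;> simp [List.cons_prefix_cons]
  exact eq_comm

theorem pv_append_prefix {α : Type} {a b l : List α} :
    (a ++ b) <+: l ↔ a <+: l ∧ b <+: l.drop a.length := by
  constructor
  · rintro ⟨t, ht⟩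
    subst ht
    refine ⟨⟨b ++ t, by simp⟩, ?_⟩
    rw [List.append_assoc, List.drop_left]
    exact ⟨t, rfl⟩
  · rintro ⟨ha, hb⟩
    obtain ⟨t, ht⟩ := hb
    refine ⟨t, ?_⟩
    conv_rhs => rw [← List.take_append_drop a.length l]
    rw [← List.prefix_iff_eq_take.mp ha, ← ht, List.append_assoc]

-- find points at the stated first occurrence
theorem pv_find_char_eq {l : List Char} {c : Char} {m : Nat}
    (hm : l[m]? = some c) (hlt : ∀ j < m, l[j]? ≠ some c) :
    PySem.Chars.find l [c] = (m : Int) := by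
  have hocc : [c] <+: l.drop m := pv_singleton_prefix_drop.mpr hm
  have hnn : 0 ≤ PySem.Chars.find l [c] := by
    rw [PySem.Chars.find_nonneg_iff]
    exact (List.infix_iff_prefix_suffix.mpr ⟨_, hocc, List.drop_suffix _ _⟩)
  obtain ⟨h1, h2⟩ := PySem.Chars.find_spec hnn
  have hle : (PySem.Chars.find l [c]).toNat ≤ m := by
    by_contra hgt
    exact (h2 m (by omega)) hocc
  have hge : m ≤ (PySem.Chars.find l [c]).toNat := by
    by_contra hgt
    exact hlt _ (by omega) (pv_singleton_prefix_drop.mp h1)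
  omega

theorem pv_pyRange_nodup (n : Int) : (PySem.List.pyRange 0 n 1).Nodup := by
  by_cases hn : 0 < n
  · have h : n = ((n.toNat : Nat) : Int) := by omega
    rw [h, PySem.List.pyRange_zero_natCast]
    exact List.Nodup.map (fun a b hab => by omega) List.nodup_range
  · have h : PySem.List.pyRange 0 n 1 = [] := by
      rw [List.eq_nil_iff_forall_not_mem]
      intro x hx
      rw [PySem.List.mem_pyRange_one] at hx
      omega
    simp [h]

theorem pv_modify_modify {δ : Type} (es : List δ) (j : Nat) (f g : δ → δ) :
    (es.modify j f).modify j g = es.modify j (fun d => g (f d)) := by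
  apply List.ext_getElem?
  intro i
  simp only [List.getElem?_modify]
  cases es[i]? <;> simp <;> split <;> simp

-- an inner loop that conditionally modifies one fixed index commutes with the fold
theorem pv_foldl_if_modify {γ δ : Type} (xs : List γ) (c : γ → Bool) (g : γ → δ → δ)
    (j : Nat) (es : List δ) :
    xs.foldl (fun es x => if c x then es.modify j (g x) else es) es
      = es.modify j (fun d => xs.foldl (fun d x => if c x then g x d else d) d) := by
  induction xs generalizing es with
  | nil =>
    apply List.ext_getElem?
    intro i
    rw [List.getElem?_modify]
    simp
  | cons x xs ih =>
    simp only [List.foldl_cons]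
    by_cases hc : c x
    · simp [hc, ih, pv_modify_modify]
    · simp [hc, ih]

-- A's outer loop, pointwise
theorem pv_foldA_get {δ : Type} (rng : List Int) (G : Int → δ → δ) (es : List δ)
    (hn : ∀ i ∈ rng, 0 ≤ i) (hd : rng.Nodup) (k : Nat) :
    (rng.foldl (fun es i => es.modify i.toNat (G i)) es)[k]? =
      if (k : Int) ∈ rng then (es[k]?).map (G (k : Int)) else es[k]? := by
  induction rng generalizing es with
  | nil => simp
  | cons i rng ih =>
    simp only [List.foldl_cons]
    have hi0 : 0 ≤ i := hn i (by simp)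
    rw [ih _ (fun a ha => hn a (List.mem_cons_of_mem _ ha)) (List.nodup_cons.mp hd).2]
    by_cases hik : i = (k : Int)
    · subst hik
      have hni : ((k : Int)) ∉ rng := (List.nodup_cons.mp hd).1
      simp only [hni, if_false, List.mem_cons, or_false, List.getElem?_modify,
        Int.toNat_natCast]
      cases es[k]? <;> simp
    · have h2 : i.toNat ≠ k := by omega
      rw [List.getElem?_modify]
      have hmem : ((k : Int) ∈ i :: rng) ↔ ((k : Int) ∈ rng) := by
        simp [Ne.symm hik]
      rw [if_congr hmem rfl rfl]
      cases es[k]? <;> simp [h2]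

-- one group of B's grouping loop is the fold over the entries routed to it
theorem pv_getD_foldl_modify {κ ν γ : Type} [BEq κ] [LawfulBEq κ] [DecidableEq κ]
    (l : List γ) (c : γ → Bool) (keyf : γ → κ) (f : γ → ν → ν)
    (g0 : PySem.Dict κ ν) (x : κ) (d0 : ν) :
    (l.foldl (fun g a => if c a then g.modify (keyf a) d0 (f a) else g) g0).getD x d0
      = (l.filter (fun a => c a && (keyf a == x))).foldl (fun v a => f a v) (g0.getD x d0) := by
  induction l generalizing g0 with
  | nil => simp
  | cons a l ih =>
    simp only [List.foldl_cons, List.filter_cons]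
    by_cases hc : c a
    · rw [if_pos hc, ih]
      by_cases hk : keyf a = x
      · have : (c a && (keyf a == x)) = true := by simp [hc, hk]
        rw [this, if_pos rfl]
        simp only [List.foldl_cons]
        rw [PySem.Dict.getD_modify, if_pos hk.symm, hk]
      · have : (c a && (keyf a == x)) = false := by simp [hk]
        rw [this]
        simp only [Bool.false_eq_true, if_false]
        rw [PySem.Dict.getD_modify, if_neg (Ne.symm hk)]
    · rw [if_neg hc, ih]
      have : (c a && (keyf a == x)) = false := by simp [hc]
      rw [this]
      simp

-- proof-side names for B's segment / stripped key
def pvSeg (pre : List Char) (s : String) : List Char :=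
  PySem.List.slice (PySem.List.slice s.toList (some (pre.length : Int)) none) none
    (some (PySem.Chars.find (PySem.List.slice s.toList (some (pre.length : Int)) none) ['.']))

def pvShortB (pre : List Char) (s : String) : List Char :=
  PySem.List.slice (PySem.List.slice s.toList (some (pre.length : Int)) none)
    (some (PySem.Chars.find (PySem.List.slice s.toList (some (pre.length : Int)) none) ['.'] + 1)) none

-- B's per-key test, as one Bool
def pvCondB (pre : List Char) (s : String) : Bool :=
  PySem.Chars.startswith s.toList pre &&
    !(PySem.Chars.find (PySem.List.slice s.toList (some (pre.length : Int)) none) ['.'] == -1)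

theorem pv_bstep_eq (pre : List Char)
    (g : PySem.Dict (List Char) (PySem.Dict (List Char) Int)) (kv : String × Int) :
    pvBStep pre g kv =
      if pvCondB pre kv.1 then
        g.modify (pvSeg pre kv.1) PySem.Dict.empty
          (fun d => d.insert (pvShortB pre kv.1) kv.2)
      else g := by
  unfold pvBStep pvCondB pvSeg pvShortB
  simp only [PySem.List.slice_from_natCast]
  by_cases h1 : PySem.Chars.startswith kv.1.toList pre
  · rw [if_pos h1]
    by_cases h2 : PySem.Chars.find (kv.1.toList.drop pre.length) ['.'] ≠ -1
    · rw [if_pos h2, if_pos (by simp [h1]; exact h2)]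
    · rw [if_neg h2, if_neg (by simp [h1]; exact not_not.mp h2)]
  · rw [if_neg h1, if_neg (by simp [h1])]

-- if the full expert prefix matches, the first '.' after the common prefix sits right after str(i)
theorem pv_find_after_prefix {pre ti cs : List Char} (hdot : '.' ∉ ti)
    (h : (pre ++ (ti ++ ['.'])) <+: cs) :
    PySem.Chars.find (cs.drop pre.length) ['.'] = (ti.length : Int) := by
  rw [pv_append_prefix] at h
  obtain ⟨-, h⟩ := h
  rw [pv_append_prefix] at h
  obtain ⟨h1, h2⟩ := h
  apply pv_find_char_eq
  · exact pv_singleton_prefix_drop.mp h2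
  · intro j hj hsome
    obtain ⟨t, ht⟩ := h1
    rw [← ht, List.getElem?_append_left (by omega)] at hsome
    exact hdot (List.mem_of_getElem? hsome)

-- the crux: A's per-expert test coincides with B's routing
theorem pv_cond_iff {i : Int} (hi : 0 ≤ i) (pre : List Char) (s : String) :
    PySem.Chars.startswith s.toList (pre ++ PySem.Int.toChars i ++ ['.'])
      = (pvCondB pre s && (pvSeg pre s == PySem.Int.toChars i)) := by
  set ti := PySem.Int.toChars i with hti
  set cs := s.toList
  set rest := cs.drop pre.length with hrest
  unfold pvCondB pvSeg
  simp only [PySem.List.slice_from_natCast]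
  by_cases hs : PySem.Chars.startswith cs pre
  · by_cases hfull : PySem.Chars.startswith cs (pre ++ ti ++ ['.'])
    · rw [hfull]
      rw [PySem.Chars.startswith_iff, List.append_assoc] at hfull
      have hfind : PySem.Chars.find rest ['.'] = (ti.length : Int) :=
        pv_find_after_prefix (pv_dot_not_mem_toChars hi) hfull
      rw [hfind]
      have hpre2 : (ti ++ ['.']) <+: rest := (pv_append_prefix.mp hfull).2
      have htake : PySem.List.slice rest none (some (ti.length : Int)) = ti := by
        rw [PySem.List.slice_to _ (by omega)]
        obtain ⟨t, ht⟩ := hpre2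
        rw [← ht]
        simp [Int.toNat_natCast]
      rw [htake, hs]
      simp
    · rw [(Bool.eq_false_iff.mpr hfull : _)]
      symm
      rw [Bool.and_eq_false_iff]
      by_cases hp : PySem.Chars.find rest ['.'] = -1
      · left
        show (PySem.Chars.startswith cs pre && !(PySem.Chars.find rest ['.'] == -1)) = false
        simp [hp]
      · right
        rw [beq_eq_false_iff_ne]
        intro hseg0
        apply hfull
        have hp0 : 0 ≤ PySem.Chars.find rest ['.'] := by
          have := PySem.Chars.neg_one_le_find rest ['.']
          omega
        set p := PySem.Chars.find rest ['.'] with hp'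
        rw [PySem.List.slice_to _ hp0] at hseg0
        have hseg : List.take p.toNat rest = ti := hseg0
        have hdotp : rest[p.toNat]? = some '.' :=
          pv_singleton_prefix_drop.mp (PySem.Chars.find_spec hp0).1
        have hplen : p.toNat < rest.length := (List.getElem?_eq_some_iff.mp hdotp).1
        have hlen : ti.length = p.toNat := by
          have := congrArg List.length hseg
          simp [List.length_take] at this
          omega
        rw [PySem.Chars.startswith_iff, List.append_assoc, pv_append_prefix]
        refine ⟨PySem.Chars.startswith_iff _ _ |>.mp hs, ?_⟩
        rw [← hrest, pv_append_prefix]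
        constructor
        · exact ⟨rest.drop p.toNat, by rw [← hseg]; exact List.take_append_drop _ _⟩
        · rw [hlen]
          exact pv_singleton_prefix_drop.mpr hdotp
  · have hf : PySem.Chars.startswith cs (pre ++ ti ++ ['.']) = false := by
      rw [Bool.eq_false_iff]
      intro hc
      rw [PySem.Chars.startswith_iff, List.append_assoc, pv_append_prefix] at hc
      exact (Bool.eq_false_iff.mp (Bool.not_eq_true _ ▸ by simpa using hs))
        (PySem.Chars.startswith_iff _ _ |>.mpr hc.1)
    rw [hf, (Bool.eq_false_iff.mpr hs : _)]
    simp

-- and when the test holds the stripped keys agree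
theorem pv_short_eq {i : Int} (hi : 0 ≤ i) (pre : List Char) (s : String)
    (h : PySem.Chars.startswith s.toList (pre ++ PySem.Int.toChars i ++ ['.']) = true) :
    PySem.List.slice s.toList (some (((pre ++ PySem.Int.toChars i ++ ['.']).length : Nat) : Int)) none
      = pvShortB pre s := by
  rw [PySem.Chars.startswith_iff, List.append_assoc] at h
  have hfind := pv_find_after_prefix (pv_dot_not_mem_toChars hi) h
  unfold pvShortB
  simp only [PySem.List.slice_from_natCast]
  rw [hfind]
  have hc : ((PySem.Int.toChars i).length : Int) + 1 = (((PySem.Int.toChars i).length + 1 : Nat) : Int) := by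
    push_cast
    ring
  rw [hc, PySem.List.slice_from_natCast, List.drop_drop, List.length_append, List.length_append]
  congr 1

-- A's per-expert accumulation (proof-side name for A's inner loop, folded over the dict)
def pvGA (sd : List (String × Int)) (pre : List Char) (i : Int)
    (d : PySem.Dict (List Char) Int) : PySem.Dict (List Char) Int :=
  sd.foldl (fun d kv =>
    if PySem.Chars.startswith kv.1.toList (pre ++ PySem.Int.toChars i ++ ['.']) then
      d.insert (PySem.List.slice kv.1.toList
        (some ((((pre ++ PySem.Int.toChars i ++ ['.']).length : Nat) : Int))) none) kv.2
    else d) d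

-- per expert index, A's scan equals B's group
theorem pv_inner_eq {i : Int} (hi : 0 ≤ i) (pre : List Char) (sd : List (String × Int)) :
    pvGA sd pre i PySem.Dict.empty
      = (sd.foldl (fun g kv =>
          if pvCondB pre kv.1 then
            g.modify (pvSeg pre kv.1) PySem.Dict.empty
              (fun d => d.insert (pvShortB pre kv.1) kv.2)
          else g) PySem.Dict.empty).getD (PySem.Int.toChars i) PySem.Dict.empty := by
  rw [pv_getD_foldl_modify sd (fun kv => pvCondB pre kv.1) (fun kv => pvSeg pre kv.1)
        (fun kv d => d.insert (pvShortB pre kv.1) kv.2) PySem.Dict.empty _ PySem.Dict.empty]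
  unfold pvGA
  rw [PySem.List.foldl_if_eq_foldl_filter]
  rw [List.filter_congr (fun kv _ => pv_cond_iff hi pre kv.1)]
  apply PySem.List.foldl_congr_mem
  intro acc kv hkv
  have hcond : PySem.Chars.startswith kv.1.toList (pre ++ PySem.Int.toChars i ++ ['.']) = true := by
    rw [pv_cond_iff hi pre kv.1]
    exact (List.mem_filter.mp hkv).2
  rw [pv_short_eq hi pre kv.1 hcond]

-- ===== VERDICT (by name: the statement is the Claim_ definition above) =====
theorem extract_moe_experts_spec : Claim_equal_extract_moe_experts := by
  intro sd li n _
  unfold Spec_extract_moe_experts extract_moe_experts extract_moe_experts_alt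
  dsimp only
  apply congrArg
  set pre : List Char :=
    "model.layers.".toList ++ PySem.Int.toChars li ++ ".block_sparse_moe.experts.".toList with hpre
  set rng := PySem.List.pyRange 0 n 1 with hrng
  set es0 : List (PySem.Dict (List Char) Int) := rng.map (fun _ => PySem.Dict.empty) with hes0
  -- A's outer body: inner scan = modify at i of the per-expert fold
  have hA : rng.foldl (fun experts i =>
      sd.foldl (fun experts kv =>
        if PySem.Chars.startswith kv.1.toList (pre ++ PySem.Int.toChars i ++ ['.']) then
          experts.modify i.toNat (fun d =>
            d.insert (PySem.List.slice kv.1.toList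
              (some (((pre ++ PySem.Int.toChars i ++ ['.']).length : Nat) : Int)) none) kv.2)
        else experts) experts) es0
      = rng.foldl (fun experts i => experts.modify i.toNat (pvGA sd pre i)) es0 :=
    PySem.List.foldl_congr_mem _ _ _ _ (fun es i _ => pv_foldl_if_modify sd _ _ i.toNat es)
  rw [hA]
  -- B's loop in single-test form
  have hB : sd.foldl (pvBStep pre) PySem.Dict.empty
      = sd.foldl (fun g kv =>
          if pvCondB pre kv.1 then
            g.modify (pvSeg pre kv.1) PySem.Dict.empty
              (fun d => d.insert (pvShortB pre kv.1) kv.2)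
          else g) PySem.Dict.empty :=
    PySem.List.foldl_congr_mem _ _ _ _ (fun g kv _ => pv_bstep_eq pre g kv)
  rw [hB]
  apply List.ext_getElem?
  intro k
  rw [pv_foldA_get rng (pvGA sd pre) es0
        (fun i hi => by rw [hrng, PySem.List.mem_pyRange_one] at hi; omega)
        (pv_pyRange_nodup n) k]
  by_cases hk : (k : Int) < n
  · have hmem : (k : Int) ∈ rng := by
      rw [hrng, PySem.List.mem_pyRange_one]
      omega
    have hcast : n = ((n.toNat : Nat) : Int) := by omega
    have hkn : k < n.toNat := by omega
    have hrngk : rng[k]? = some ((k : Nat) : Int) := by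
      rw [hrng, hcast, PySem.List.pyRange_zero_natCast, List.getElem?_map,
        List.getElem?_range hkn]
      rfl
    rw [if_pos hmem, hes0]
    simp only [List.getElem?_map]
    rw [hrngk]
    simp only [Option.map_some]
    exact congrArg some (pv_inner_eq (by omega) pre sd)
  · have hmem : (k : Int) ∉ rng := by
      rw [hrng, PySem.List.mem_pyRange_one]
      omega
    have hrngk : rng[k]? = none := by
      rw [List.getElem?_eq_none_iff]
      by_cases hn : 0 < n
      · have hcast : n = ((n.toNat : Nat) : Int) := by omega
        rw [hrng, hcast, PySem.List.pyRange_zero_natCast, List.length_map, List.length_range]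
        omega
      · have h0 : rng = [] := by
          rw [hrng, List.eq_nil_iff_forall_not_mem]
          intro x hx
          rw [PySem.List.mem_pyRange_one] at hx
          omega
        simp [h0]
    rw [if_neg hmem, hes0]
    simp only [List.getElem?_map]
    rw [hrngk]
    rfl
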